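-- pv_equiv track=rewrite | github.com/H3artst0n3/Esame | esame.py | hourly_trend_changes
-- ===== SOURCE A (Python) =====
-- def hourly_trend_changes(time_series):
--
--
--
--     ### Inizializziamo array e variabili ###
--
--     inversion = [] # array dove verranno salvate le inversioni di trend
--
--     control_h = None # variabile che serve per "salvare" l'ora precedente e che ci servirà come controllo
--
--
--     # per comodità salviamo le due misurazioni precedenti, a quella presa in considerazione, così da poter stabilire se c'è un'inversione di trend o meno; in questo caso possiamo dire che la temperatura della riga interessata, element[1], la possiamo definire come un valore "N";
--
--
--     temp_1 = None # questa variabile corrisponderebbe al valore "N - 1"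
--
--     temp_2 = None # questa variabile corrisponderebbe al valore "N - 2"
--
--     counter = 0 # variabile che andrà a salvare il numero di inversioni di ogni ora
--
--
--
--     ### Analizziamo i dati ###
--
--     # dobbiamo controllare che il file non sia un file vuoto
--     if not len(time_series) == 0: # perciò si pone la sua lunghezza diversa da zero
--
--         for element in time_series: # per ogni elemento nel file facciamo un controllo
--
--             # prima di tutto dobbiamo controllare che i dati siano relativi alla stessa ora
--             if round(element[0]/3600) == control_h: # prendiamo in considerazione l'epoch corrente e lo dividiamo per 3600 (numero di secondi in un'ora), per vedere se la temperatura registrata appartiene alla stessa ora della misurazione registrata precedentemente, infine, arrotondiamo il risultato con il metodo round, come richiesto dalle specifiche presenti nel tema d'esame. Nel caso, invece, non si volesse arrotondare il valore, allora il controllo verrebbe: if (element[0]//3600) == control_h dove "//" indica la divisione con risultato intero e troncato della parte decimale.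
--
--                 # ora passato il controllo dobbiamo stabilire se è presente un'inversione di trend o meno. L'idea è che se tre valori, a, b, c, sono crescenti, allora questi sono: a < b < c; perciò abbiamo un'inversione nel caso b > c;
--                 # analogamente per il caso di decrescenza dove avremo a > b > c ottenendo un'inversione nel caso b < c
--
--                 if (temp_2 < temp_1 and temp_1 > element[1]) or (temp_2 > temp_1 and temp_1 < element[1]):
--
--                     # nel caso si presentasse un' inversione di trend:
--                     counter += 1 # incrementiamo il contatore di uno
--
--                 # facciamo un'ulteriore controllo:
--                 if not temp_1 == element[1]:
--
--                     # nel caso "N - 1" e "N" siano diversi, allora: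
--                     temp_2 = temp_1 # 1- salviamo il valore di "N - 1" per utilizzarlo come "N - 2"
--
--                     temp_1 = element[1] # 2- salviamo la temperatura corrente per utilizzarla poi successivamente come "N - 1"
--
--
--             elif control_h == None: # nel caso in cui l'epoch sia il primo non esistono valori con cui confrontarlo precedentemente quindi:
--
--                 temp_1 = element[1] # 1- salviamo la temperatura corrente per utilizzarla poi successivamente come "N - 1"
--
--                 temp_2 = temp_1 #2- poniamo "N - 2" = "N - 1" così da avere tutti i dati necessari per il controllo di quelli successivi
--
--                 control_h = round(element[0]/3600) # 3- salviamo l'ora corrente, approssimata, per utilizzarla successivamente come controllo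
--
--
--             else: #se invece i dati appartengono ad ore diverse:
--
--                 inversion.append(counter) # 1- salviamo il contatore nella lista
--
--                 counter = 0 # 2- azzeriamo il contatore
--
--                 control_h = round(element[0]/3600) # 3- salviamo l'ora corrente, approssimata, per utilizzarla successivamente come controllo
--
--
--                 if (temp_2 < temp_1 and temp_1 > element[1]) or (temp_2 > temp_1 and temp_1 < element[1]):
--
--                     # nel caso si presentasse un' inversione di trend al "cambio" dell'ora:
--                     counter += 1 # incrementiamo il contatore di uno
--
--
--                 if not temp_1 == element[1]:
--
--                     # nel caso "N - 1" e "N" siano diversi, allora: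
--                     temp_2 = temp_1 # 1- salviamo il valore di "N - 1" per utilizzarlo come "N - 2"
--
--                     temp_1 = element[1] # 2- salviamo la temperatura corrente per utilizzarla  successivamente come "N - 1"
--
--         inversion.append(counter) # salviamo il valore del contatore
--
--     return(inversion)
-- ===== SOURCE B (Python) =====
-- def hourly_trend_changes(time_series):
--     # Two passes: first compute each element's (hour, inversion-flag),
--     # then group maximal runs of equal consecutive hours, summing flags.
--     if not time_series:
--         return []
--     first = time_series[0]
--     t1 = t2 = first[1]
--     entries = [(round(first[0] / 3600), False)]
--     for element in time_series[1:]: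
--         flag = (t2 < t1 and t1 > element[1]) or (t2 > t1 and t1 < element[1])
--         if t1 != element[1]:
--             t2, t1 = t1, element[1]
--         entries.append((round(element[0] / 3600), flag))
--     result = []
--     cur_h = entries[0][0]
--     cnt = 0
--     for h, f in entries:
--         if h != cur_h:
--             result.append(cnt)
--             cnt = 0
--             cur_h = h
--         cnt += f
--     result.append(cnt)
--     return result
-- ===== Notes on version B (the rewrite author's own statement) =====
-- stated objective: alternative
-- what changed: Replaced A's single fused loop carrying five pieces of mutable state with a two-pass decomposition: a first pass annotates every element with its rounded hour and inversion flag, and a second pass groups maximal runs of equal consecutive hours, summing flags per run.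
import Mathlib
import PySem

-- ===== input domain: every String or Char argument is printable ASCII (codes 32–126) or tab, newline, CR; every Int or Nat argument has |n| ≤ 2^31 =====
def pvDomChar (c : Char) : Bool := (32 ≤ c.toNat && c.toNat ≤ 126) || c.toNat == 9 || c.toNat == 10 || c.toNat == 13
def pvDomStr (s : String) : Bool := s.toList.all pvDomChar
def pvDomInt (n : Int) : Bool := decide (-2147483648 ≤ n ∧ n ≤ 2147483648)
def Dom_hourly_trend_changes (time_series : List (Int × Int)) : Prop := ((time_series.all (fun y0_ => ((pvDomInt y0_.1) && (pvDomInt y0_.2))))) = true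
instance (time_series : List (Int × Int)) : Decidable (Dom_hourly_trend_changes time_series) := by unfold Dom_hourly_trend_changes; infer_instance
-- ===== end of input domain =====

-- B differs from A by decomposition only: one fused stateful loop in A vs two passes
-- (flag each element, then group consecutive equal hours) in B; same values everywhere.

-- `round(t / 3600)` for an int t with |t| ≤ 2^31: exact banker's rounding of the
-- rational t/3600 (the float division is exact enough on this domain that Python's
-- round agrees with the exact half-to-even rounding; ties t/3600 = q + 1/2 are
-- exactly representable). Shared arithmetic primitive of both ports.
def pvHour (t : Int) : Int :=
  let q := PySem.Int.floordiv t 3600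
  let r := PySem.Int.mod t 3600
  if r < 1800 then q else if 1800 < r then q + 1 else if q % 2 = 0 then q else q + 1

-- ===== PORT A =====
-- the two-sided inversion test of A; in A it only runs with both temps set
-- (a comparison with None would raise, and those branches are unreachable)
def pvFlag (temp_2 temp_1 x : Int) : Bool :=
  (temp_2 < temp_1 && temp_1 > x) || (temp_2 > temp_1 && temp_1 < x)

def pvFlagO (temp_2 temp_1 : Option Int) (x : Int) : Bool :=
  match temp_2, temp_1 with
  | some a, some b => pvFlag a b x
  | _, _ => false

-- A's for-loop, state = (control_h, temp_1, temp_2, counter, inversion)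
def pvLoopA : List (Int × Int) → Option Int → Option Int → Option Int → Int → List Int → List Int
  | [], _, _, _, counter, inversion => inversion ++ [counter]
  | e :: rest, control_h, temp_1, temp_2, counter, inversion =>
    if some (pvHour e.1) = control_h then
      let counter := if pvFlagO temp_2 temp_1 e.2 then counter + 1 else counter
      let st := if temp_1 ≠ some e.2 then (some e.2, temp_1) else (temp_1, temp_2)
      pvLoopA rest control_h st.1 st.2 counter inversion
    else if control_h = none then
      pvLoopA rest (some (pvHour e.1)) (some e.2) (some e.2) counter inversion
    else
      let inversion := inversion ++ [counter]
      let counter := 0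
      let counter := if pvFlagO temp_2 temp_1 e.2 then counter + 1 else counter
      let st := if temp_1 ≠ some e.2 then (some e.2, temp_1) else (temp_1, temp_2)
      pvLoopA rest (some (pvHour e.1)) st.1 st.2 counter inversion

def hourly_trend_changes (time_series : List (Int × Int)) : List Int :=
  if time_series.length = 0 then [] else pvLoopA time_series none none none 0 []

-- ===== PORT B =====
-- first pass: the (hour, flag) entry of each later element, threading t1/t2
def pvPass1 : List (Int × Int) → Int → Int → List (Int × Bool)
  | [], _, _ => []
  | e :: rest, t1, t2 =>
    let f := pvFlag t2 t1 e.2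
    if t1 ≠ e.2 then (pvHour e.1, f) :: pvPass1 rest e.2 t1
    else (pvHour e.1, f) :: pvPass1 rest t1 t2

-- second pass: group maximal runs of equal consecutive hours, summing flags
def pvGroup : List (Int × Bool) → Int → Int → List Int → List Int
  | [], _, cnt, result => result ++ [cnt]
  | (h, f) :: rest, cur_h, cnt, result =>
    if h ≠ cur_h then pvGroup rest h (if f then 1 else 0) (result ++ [cnt])
    else pvGroup rest cur_h (cnt + if f then 1 else 0) result

def hourly_trend_changes_alt (time_series : List (Int × Int)) : List Int :=
  match time_series with
  | [] => []
  | first :: rest =>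
    let entries : List (Int × Bool) := (pvHour first.1, false) :: pvPass1 rest first.2 first.2
    pvGroup entries (pvHour first.1) 0 []

-- ===== PRECONDITION & SPEC =====
def Spec_hourly_trend_changes (time_series : List (Int × Int)) (out : List Int) : Prop := out = hourly_trend_changes_alt time_series
instance (time_series : List (Int × Int)) (out : List Int) : Decidable (Spec_hourly_trend_changes time_series out) := by unfold Spec_hourly_trend_changes; infer_instance

-- ===== CLAIM (what is proved, stated in full; the proofs are below) =====
def Claim_equal_hourly_trend_changes : Prop := ∀ (time_series : List (Int × Int)), Dom_hourly_trend_changes time_series → Spec_hourly_trend_changes time_series (hourly_trend_changes time_series)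

-- ===== LEMMAS AND PROOFS =====

lemma pvIf_add (f : Bool) (c : Int) :
    (if f = true then c + 1 else c) = c + (if f = true then 1 else 0) := by
  cases f <;> simp

theorem pvLoopA_eq_group (rest : List (Int × Int)) :
    ∀ (h t1 t2 c : Int) (acc : List Int),
      pvLoopA rest (some h) (some t1) (some t2) c acc
        = pvGroup (pvPass1 rest t1 t2) h c acc := by
  induction rest with
  | nil => intro h t1 t2 c acc; simp [pvLoopA, pvPass1, pvGroup]
  | cons e rest ih =>
    intro h t1 t2 c acc
    simp only [pvLoopA, pvPass1, pvFlagO]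
    by_cases hh : pvHour e.1 = h <;> by_cases ht : t1 = e.2 <;>
      simp [hh, ht, ih, pvGroup, pvIf_add] <;>
      (congr 1; exact pvIf_add _ _)

-- ===== VERDICT (by name: the statement is the Claim_ definition above) =====
theorem hourly_trend_changes_spec : Claim_equal_hourly_trend_changes := by
  intro ts _
  unfold Spec_hourly_trend_changes
  match ts with
  | [] => rfl
  | first :: rest =>
    show pvLoopA (first :: rest) none none none 0 [] = _
    simp only [pvLoopA, reduceCtorEq, hourly_trend_changes_alt]
    rw [pvLoopA_eq_group]
    simp [pvGroup]
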